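-- pv_equiv track=rewrite | github.com/zluo16/python-data-structures-and-algorithms | dfs_on_2d_array.py | dfs_on_matrix
-- ===== SOURCE A (Python) =====
-- import collections
-- from typing import List
--
-- def dfs_on_matrix(matrix: List[List[int]]) -> List[int]:
--
--     x_vex = [0, 1, 0, -1]
--     y_vex = [-1, 0, 1, 0]
--
--     visited = [
--         [False for i in range(len(matrix[0]))]
--         for j in range(len(matrix))
--     ]
--
--     matrix_nodes = []
--
--     def dfs_util(row: int, col: int, m: List[List[int]]):
--         st = collections.deque()
--         st.append([row, col])
--
--         while len(st) > 0:
--             curr = st.pop()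
--             r = curr[0]
--             c = curr[1]
--
--             if r < 0 or c < 0 or r >= len(m[0]) or c >= len(m):
--                 continue
--
--             if visited[r][c]:
--                 continue
--
--             visited[r][c] = True
--
--             matrix_nodes.append(m[r][c])
--
--             for i in range(4):
--                 adj_x = r + x_vex[i]
--                 adj_y = c + y_vex[i]
--                 st.append([adj_x, adj_y])
--
--     dfs_util(0, 0, matrix)
--
--     return matrix_nodes
-- ===== SOURCE B (Python) =====
-- from typing import List
--
-- def dfs_on_matrix(matrix: List[List[int]]) -> List[int]:
--     rows, cols = len(matrix), len(matrix[0])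
--     visited = set()
--     matrix_nodes = []
--     frames = []  # [row, col, index of next direction to try]
--     directions = ((-1, 0), (0, 1), (1, 0), (0, -1))
--
--     def visit(r, c):
--         if 0 <= r < rows and 0 <= c < cols and (r, c) not in visited:
--             visited.add((r, c))
--             matrix_nodes.append(matrix[r][c])
--             frames.append([r, c, 0])
--
--     visit(0, 0)
--     while frames:
--         frame = frames[-1]
--         if frame[2] == 4:
--             frames.pop()
--         else:
--             dr, dc = directions[frame[2]]
--             frame[2] += 1
--             visit(frame[0] + dr, frame[1] + dc)
--     return matrix_nodes
-- ===== Notes on version B (the rewrite author's own statement) =====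
-- stated objective: alternative
-- what changed: Replaces A's blind-push stack DFS (every neighbour coordinate is pushed unconditionally and bounds/visited are filtered at pop time, so the stack holds many duplicate coordinates) with a frame-stack DFS: a set-based visited check at push time, one frame per visited cell carrying a next-direction counter, so each cell enters the stack at most once; Pre_ excludes exactly the inputs on which A raises IndexError (empty matrix and non-square shapes).
import Mathlib
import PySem

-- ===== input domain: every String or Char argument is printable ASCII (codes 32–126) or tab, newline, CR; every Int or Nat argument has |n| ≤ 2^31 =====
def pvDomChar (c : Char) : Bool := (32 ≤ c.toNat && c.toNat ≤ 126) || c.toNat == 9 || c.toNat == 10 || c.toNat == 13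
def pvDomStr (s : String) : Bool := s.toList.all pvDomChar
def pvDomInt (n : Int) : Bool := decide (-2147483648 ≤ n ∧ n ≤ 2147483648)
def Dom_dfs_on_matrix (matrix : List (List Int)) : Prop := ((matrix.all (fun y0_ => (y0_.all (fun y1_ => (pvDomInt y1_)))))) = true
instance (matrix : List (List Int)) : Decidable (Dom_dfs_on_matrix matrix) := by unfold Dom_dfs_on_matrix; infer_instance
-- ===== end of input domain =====

-- B replaces A's blind-push stack DFS (push every neighbour coordinate, filter bounds/visited
-- at pop time) with a frame-stack DFS: a visited set checked at push time and one frame per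
-- visited cell carrying a next-direction counter; objective: alternative.
-- A mutates nothing observable; equivalence is about the return value.

-- ===== PORT A =====
-- visited[r][c] lookup (both indices already guarded nonnegative by A's bounds check,
-- so plain Nat indexing is exact; none = Python IndexError, outside Pre_)
def vget (v : List (List Bool)) (r c : Nat) : Option Bool :=
  match v[r]? with
  | some row => row[c]?
  | none => none

-- visited[r][c] = True
def vset (v : List (List Bool)) (r c : Nat) : List (List Bool) :=
  v.modify r (fun row => row.set c true)

-- m[r][c] (indices guarded nonnegative; where Python raises IndexError the default 0
-- fires, which only happens outside Pre_)
def aget (m : List (List Int)) (r c : Nat) : Int :=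
  match m[r]? with
  | some row => (row[c]?).getD 0
  | none => 0

def unvis (v : List (List Bool)) : Nat := (v.map (fun row => row.count false)).sum

-- termination helper for loopA: marking an unvisited cell decreases the unvisited count
theorem count_false_set_lt (row : List Bool) (c : Nat) (h : row[c]? = some false) :
    (row.set c true).count false < row.count false := by
  have hc : c < row.length := by
    by_contra hlen
    simp [List.getElem?_eq_none (by omega : row.length ≤ c)] at h
  have hv : row[c] = false := by
    have := List.getElem?_eq_getElem hc
    rw [this] at h; exact (Option.some.injEq _ _).mp h
  rw [List.count_set hc]
  have hpos : 0 < row.count false :=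
    List.count_pos_iff.mpr (by have := List.getElem_mem hc; rwa [hv] at this)
  simp only [hv, beq_self_eq_true, if_true]
  rw [if_neg (by decide : ¬((true == false) = true))]
  omega

theorem unvis_vset_lt (v : List (List Bool)) (r c : Nat) (h : vget v r c = some false) :
    unvis (vset v r c) < unvis v := by
  induction v generalizing r with
  | nil => simp [vget] at h
  | cons row rest ih =>
    cases r with
    | zero =>
      simp [vget] at h
      simp [vset, unvis, List.modify, List.map, List.sum_cons]
      have := count_false_set_lt row c h
      omega
    | succ r =>
      have h' : vget rest r c = some false := by simpa [vget] using h
      have := ih r h'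
      simpa [vset, unvis, List.modify, List.sum_cons] using this

-- the while-loop of dfs_util; the stack is kept head-as-top, so Python's
-- append/pop-from-the-right become cons/uncons and the block of four appended
-- neighbours appears in reversed (pop) order
def loopA (m : List (List Int)) (rows cols0 : Int) :
    List (Int × Int) → List (List Bool) → List Int → List (List Bool) × List Int
  | [], v, acc => (v, acc)
  | (r, c) :: st, v, acc =>
    if r < 0 ∨ c < 0 ∨ cols0 ≤ r ∨ rows ≤ c then
      loopA m rows cols0 st v acc
    else
      match h : vget v r.toNat c.toNat with
      | none => loopA m rows cols0 st v acc  -- Python raises IndexError here; outside Pre_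
      | some true => loopA m rows cols0 st v acc
      | some false =>
        loopA m rows cols0 ((r - 1, c) :: (r, c + 1) :: (r + 1, c) :: (r, c - 1) :: st)
          (vset v r.toNat c.toNat) (acc ++ [aget m r.toNat c.toNat])
  termination_by st v _ => 5 * unvis v + st.length
  decreasing_by
  · simp
  · simp
  · simp
  · have := unvis_vset_lt v r.toNat c.toNat h
    simp; omega

def dfs_on_matrix (matrix : List (List Int)) : List Int :=
  match matrix with
  | [] => []  -- Python: matrix[0] raises IndexError; outside Pre_
  | row0 :: _ =>
    let visited := List.replicate matrix.length (List.replicate row0.length false)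
    (loopA matrix (matrix.length : Int) (row0.length : Int) [(0, 0)] visited []).2

-- ===== PORT B =====
-- the direction tuple; index 4 is never reached by the loop (the counter is capped there)
def dirB (d : Nat) : Int × Int :=
  match d with
  | 0 => (-1, 0)
  | 1 => (0, 1)
  | 2 => (1, 0)
  | _ => (0, -1)

-- visit(r, c): bounds + membership check, then mark, record the value and push a frame
-- (frames are kept head-as-top, mirroring Python's append/[-1]/pop at the right end)
def visitB (m : List (List Int)) (rows cols : Int) (r c : Int)
    (S : PySem.Set (Int × Int)) (out : List Int) (fr : List (Int × Int × Nat)) :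
    PySem.Set (Int × Int) × List Int × List (Int × Int × Nat) :=
  if 0 ≤ r ∧ r < rows ∧ 0 ≤ c ∧ c < cols ∧ ¬((r, c) ∈ S) then
    (PySem.Set.add S (r, c), out ++ [aget m r.toNat c.toNat], (r, c, 0) :: fr)
  else (S, out, fr)

-- termination measure helpers for loopB
def cellsB (R C : Nat) : List (Int × Int) :=
  ((List.range R).product (List.range C)).map (fun rc => ((rc.1 : Int), (rc.2 : Int)))

def sunvis (R C : Nat) (S : List (Int × Int)) : Nat :=
  (cellsB R C).countP (fun p => !decide (p ∈ S))

def framesW (fr : List (Int × Int × Nat)) : Nat :=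
  (fr.map (fun f => 6 - min f.2.2 5)).sum

theorem mem_cellsB {R C r c : Nat} (hr : r < R) (hc : c < C) :
    ((r : Int), (c : Int)) ∈ cellsB R C := by
  unfold cellsB
  rw [List.mem_map]
  exact ⟨(r, c), List.pair_mem_product.mpr ⟨List.mem_range.mpr hr, List.mem_range.mpr hc⟩, rfl⟩

theorem mem_cellsB_of_bounds {rows cols x y : Int} (h0x : 0 ≤ x) (hx : x < rows)
    (h0y : 0 ≤ y) (hy : y < cols) : (x, y) ∈ cellsB rows.toNat cols.toNat := by
  have h1 : x.toNat < rows.toNat := by omega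
  have h2 : y.toNat < cols.toNat := by omega
  have := mem_cellsB h1 h2
  rwa [Int.toNat_of_nonneg h0x, Int.toNat_of_nonneg h0y] at this

theorem sunvis_add_lt {R C : Nat} {S : List (Int × Int)} {p : Int × Int}
    (hp : p ∈ cellsB R C) (hns : p ∉ S) :
    sunvis R C (PySem.Set.add S p) < sunvis R C S := by
  rw [PySem.Set.add_of_not_mem hns]
  obtain ⟨l₁, l₂, hsplit⟩ := List.append_of_mem hp
  unfold sunvis
  rw [hsplit]
  simp only [List.countP_append, List.countP_cons]
  have hmono : ∀ l : List (Int × Int),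
      l.countP (fun q => !decide (q ∈ S ++ [p])) ≤ l.countP (fun q => !decide (q ∈ S)) := by
    intro l
    apply List.countP_mono_left
    intro a _ ha
    simp only [Bool.not_eq_true', decide_eq_false_iff_not, List.mem_append] at ha ⊢
    tauto
  have h1 := hmono l₁
  have h2 := hmono l₂
  have hpnew : (!decide (p ∈ S ++ [p])) = false := by simp
  have hpold : (!decide (p ∈ S)) = true := by simpa using hns
  rw [hpnew, hpold, if_neg (by decide), if_pos rfl]
  omega

theorem visit_measure (m : List (List Int)) (rows cols x y : Int) (S : PySem.Set (Int × Int))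
    (out : List Int) (r c : Int) (d : Nat) (rest : List (Int × Int × Nat)) (hd : d < 4) :
    7 * sunvis rows.toNat cols.toNat (visitB m rows cols x y S out ((r, c, d + 1) :: rest)).1
      + framesW (visitB m rows cols x y S out ((r, c, d + 1) :: rest)).2.2
      < 7 * sunvis rows.toNat cols.toNat S + framesW ((r, c, d) :: rest) := by
  unfold visitB
  split_ifs with h
  · obtain ⟨h1, h2, h3, h4, h5⟩ := h
    have hlt := sunvis_add_lt (mem_cellsB_of_bounds h1 h2 h3 h4) h5
    simp only [framesW, List.map_cons, List.sum_cons]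
    omega
  · simp only [framesW, List.map_cons, List.sum_cons]
    omega

-- the while loop over the frame stack
def loopB (m : List (List Int)) (rows cols : Int) :
    List (Int × Int × Nat) → PySem.Set (Int × Int) → List Int →
      PySem.Set (Int × Int) × List Int
  | [], S, out => (S, out)
  | (r, c, d) :: rest, S, out =>
    if 4 ≤ d then  -- the counter only ever reaches 4, so this is Python's 'frame[2] == 4'
      loopB m rows cols rest S out
    else
      let st := visitB m rows cols (r + (dirB d).1) (c + (dirB d).2) S out ((r, c, d + 1) :: rest)
      loopB m rows cols st.2.2 st.1 st.2.1
  termination_by fr S _ => 7 * sunvis rows.toNat cols.toNat S + framesW fr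
  decreasing_by
  · simp only [framesW, List.map_cons, List.sum_cons]
    omega
  · exact visit_measure m rows cols _ _ S out r c d rest (by omega)

def dfs_on_matrix_alt (matrix : List (List Int)) : List Int :=
  match matrix with
  | [] => []  -- Python: matrix[0] raises IndexError; outside Pre_
  | row0 :: _ =>
    let st := visitB matrix (matrix.length : Int) (row0.length : Int) 0 0 PySem.Set.empty [] []
    (loopB matrix (matrix.length : Int) (row0.length : Int) st.2.2 st.1 st.2.1).2

-- ===== PRECONDITION & SPEC =====
-- Pre_ admits exactly the inputs on which the Python A returns normally: a nonempty
-- matrix whose first row is empty (the bounds check then rejects the start cell and A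
-- returns an empty result), or a square shape len(matrix[0]) = len(matrix) with every row
-- at least that long; on every other input A raises IndexError (empty indexing or the
-- swapped-dimension bounds check walking off visited/matrix).
def Pre_dfs_on_matrix (matrix : List (List Int)) : Prop :=
  matrix ≠ [] ∧
    ((matrix.headD []).length = 0 ∨
      ((matrix.headD []).length = matrix.length ∧
        ∀ row ∈ matrix, matrix.length ≤ row.length))

instance (matrix : List (List Int)) : Decidable (Pre_dfs_on_matrix matrix) := by
  unfold Pre_dfs_on_matrix; infer_instance

def pvWitness_dfs_on_matrix : List (List Int) := [[1, 2], [3, 4]]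

def Spec_dfs_on_matrix (matrix : List (List Int)) (out : List Int) : Prop := out = dfs_on_matrix_alt matrix
instance (matrix : List (List Int)) (out : List Int) : Decidable (Spec_dfs_on_matrix matrix out) := by unfold Spec_dfs_on_matrix; infer_instance

-- ===== CLAIM (what is proved, stated in full; the proofs are below) =====
def Claim_equal_dfs_on_matrix : Prop := ∀ (matrix : List (List Int)), Dom_dfs_on_matrix matrix → Pre_dfs_on_matrix matrix → Spec_dfs_on_matrix matrix (dfs_on_matrix matrix)

-- ===== LEMMAS AND PROOFS =====

-- ---- A-side: v agrees with the Boolean predicate P on the n × n square ----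
def VRep (v : List (List Bool)) (n : Nat) (P : Nat → Nat → Bool) : Prop :=
  ∀ r c, r < n → c < n → vget v r c = some (P r c)

theorem VRep_ext {v n P Q} (h : VRep v n P)
    (hpq : ∀ r c, r < n → c < n → P r c = Q r c) : VRep v n Q := by
  intro r c hr hc; rw [← hpq r c hr hc]; exact h r c hr hc

theorem VRep_replicate (R n : Nat) (hR : n ≤ R) :
    VRep (List.replicate R (List.replicate n false)) n (fun _ _ => false) := by
  intro r c hr hc
  simp [vget, Nat.lt_of_lt_of_le hr hR, hc]

theorem VRep_set {v : List (List Bool)} {n : Nat} {P : Nat → Nat → Bool} (h : VRep v n P)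
    (r c : Nat) (hr : r < n) (hc : c < n) :
    VRep (vset v r c) n (fun r' c' => (r' == r && c' == c) || P r' c') := by
  intro r' c' hr' hc'
  have h' := h r' c' hr' hc'
  simp only [vget] at h' ⊢
  simp only [vset, List.getElem?_modify]
  cases hv : v[r']? with
  | none => rw [hv] at h'; simp at h'
  | some row =>
    rw [hv] at h'
    replace h' : row[c']? = some (P r' c') := h'
    have hmap : ((fun a => if r = r' then a.set c true else a) <$> some row)
        = some (if r = r' then row.set c true else row) := rfl
    rw [hmap]
    by_cases hrr : r = r'
    · have hcl : c < row.length := by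
        have hrc := h r' c hr' hc
        simp only [vget, hv] at hrc
        exact (List.getElem?_eq_some_iff.mp hrc).1
      rw [if_pos hrr]
      show (row.set c true)[c']? = _
      rw [List.getElem?_set]
      by_cases hcc : c = c'
      · subst hcc; subst hrr; simp [hcl]
      · subst hrr; rw [if_neg hcc]; simp [h', Ne.symm hcc]
    · rw [if_neg hrr]
      show row[c']? = _
      simp [Ne.symm hrr, h']

-- one-step unfolding lemmas for loopA
theorem loopA_nil (m : List (List Int)) (rows cols0 : Int) (v : List (List Bool)) (acc : List Int) :
    loopA m rows cols0 [] v acc = (v, acc) := by rw [loopA]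

theorem loopA_skip (m : List (List Int)) (rows cols0 r c : Int) (st : List (Int × Int))
    (v : List (List Bool)) (acc : List Int)
    (h : r < 0 ∨ c < 0 ∨ cols0 ≤ r ∨ rows ≤ c) :
    loopA m rows cols0 ((r, c) :: st) v acc = loopA m rows cols0 st v acc := by
  rw [loopA]; simp [h]

theorem loopA_vis (m : List (List Int)) (rows cols0 r c : Int) (st : List (Int × Int))
    (v : List (List Bool)) (acc : List Int)
    (h : ¬(r < 0 ∨ c < 0 ∨ cols0 ≤ r ∨ rows ≤ c)) (hv : vget v r.toNat c.toNat = some true) :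
    loopA m rows cols0 ((r, c) :: st) v acc = loopA m rows cols0 st v acc := by
  rw [loopA, if_neg h]; split <;> simp_all

theorem loopA_mark (m : List (List Int)) (rows cols0 r c : Int) (st : List (Int × Int))
    (v : List (List Bool)) (acc : List Int)
    (h : ¬(r < 0 ∨ c < 0 ∨ cols0 ≤ r ∨ rows ≤ c)) (hv : vget v r.toNat c.toNat = some false) :
    loopA m rows cols0 ((r, c) :: st) v acc =
      loopA m rows cols0 ((r - 1, c) :: (r, c + 1) :: (r + 1, c) :: (r, c - 1) :: st)
        (vset v r.toNat c.toNat) (acc ++ [aget m r.toNat c.toNat]) := by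
  rw [loopA, if_neg h]; split <;> simp_all

-- visit-order segments: column c0 downward from row r0, upward down to row 1
def segD (m : List (List Int)) (n c0 r0 : Nat) : List Int :=
  (List.range' r0 (n - r0)).map (fun r => aget m r c0)

def segU (m : List (List Int)) (c0 r0 : Nat) : List Int :=
  ((List.range' 1 r0).reverse).map (fun r => aget m r c0)

-- values of the last cnt columns (indices cnt-1 … 0), alternating direction
def snakeCols (m : List (List Int)) (n : Nat) : Nat → Bool → List Int
  | 0, _ => []
  | c + 1, down =>
    (if down then segD m n c 1 else segU m c (n - 1)) ++ snakeCols m n c (!down)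

-- the visited predicates of the three traversal phases
def Prow (j r c : Nat) : Bool := r == 0 && c < j
def Pdown (c0 r0 r c : Nat) : Bool := r == 0 || c0 < c || (c == c0 && r < r0)
def Pup (c0 r0 r c : Nat) : Bool := r == 0 || c0 < c || (c == c0 && r0 < r)

-- segment unfolding
theorem segD_cons (m : List (List Int)) (n c0 r0 : Nat) (h : r0 < n) :
    segD m n c0 r0 = aget m r0 c0 :: segD m n c0 (r0 + 1) := by
  unfold segD
  rw [show n - r0 = (n - (r0 + 1)) + 1 from by omega, List.range'_succ]
  simp

theorem segU_cons (m : List (List Int)) (c0 r0 : Nat) (h : 1 ≤ r0) :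
    segU m c0 r0 = aget m r0 c0 :: segU m c0 (r0 - 1) := by
  unfold segU
  rw [show r0 = (r0 - 1) + 1 from by omega, List.range'_concat]
  simp [show 1 + (r0 - 1) = r0 from by omega, show r0 - 1 + 1 - 1 = r0 - 1 from by omega,
    show r0 - 1 + 1 = r0 from by omega]

theorem snakeCols_succ (m : List (List Int)) (n c : Nat) (down : Bool) :
    snakeCols m n (c + 1) down
      = (if down then segD m n c 1 else segU m c (n - 1)) ++ snakeCols m n c (!down) := by
  simp [snakeCols]

-- processing one stack entry: skip a visited in-range cell / mark an unvisited one
theorem step_vis {m : List (List Int)} {n : Nat} {v : List (List Bool)} {P : Nat → Nat → Bool}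
    (hV : VRep v n P) (r c : Int) (h0r : 0 ≤ r) (h0c : 0 ≤ c)
    (hrn : r < (n : Int)) (hcn : c < (n : Int)) (hP : P r.toNat c.toNat = true)
    (st : List (Int × Int)) (acc : List Int) :
    loopA m (n : Int) (n : Int) ((r, c) :: st) v acc = loopA m (n : Int) (n : Int) st v acc := by
  apply loopA_vis _ _ _ _ _ _ _ _ (by omega)
  rw [hV r.toNat c.toNat (by omega) (by omega), hP]

theorem step_mark {m : List (List Int)} {n : Nat} {v : List (List Bool)} {P : Nat → Nat → Bool}
    (hV : VRep v n P) (r c : Int) (h0r : 0 ≤ r) (h0c : 0 ≤ c)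
    (hrn : r < (n : Int)) (hcn : c < (n : Int)) (hP : P r.toNat c.toNat = false)
    (st : List (Int × Int)) (acc : List Int) :
    loopA m (n : Int) (n : Int) ((r, c) :: st) v acc =
      loopA m (n : Int) (n : Int) ((r - 1, c) :: (r, c + 1) :: (r + 1, c) :: (r, c - 1) :: st)
        (vset v r.toNat c.toNat) (acc ++ [aget m r.toNat c.toNat]) := by
  apply loopA_mark _ _ _ _ _ _ _ _ (by omega)
  rw [hV r.toNat c.toNat (by omega) (by omega), hP]

theorem step_skip {m : List (List Int)} {n : Nat} {v : List (List Bool)} {P : Nat → Nat → Bool}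
    (hV : VRep v n P) (r c : Int)
    (hP : 0 ≤ r → 0 ≤ c → r < (n : Int) → c < (n : Int) → P r.toNat c.toNat = true)
    (st : List (Int × Int)) (acc : List Int) :
    loopA m (n : Int) (n : Int) ((r, c) :: st) v acc = loopA m (n : Int) (n : Int) st v acc := by
  by_cases hin : 0 ≤ r ∧ 0 ≤ c ∧ r < (n : Int) ∧ c < (n : Int)
  · exact step_vis hV r c hin.1 hin.2.1 hin.2.2.1 hin.2.2.2
      (hP hin.1 hin.2.1 hin.2.2.1 hin.2.2.2) st acc
  · exact loopA_skip _ _ _ _ _ _ _ _ (by omega)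

-- the column phases: processing the entry (r0, c0) completes the whole rest of the
-- traversal, appending its snake tail and leaving everything visited
theorem phase (m : List (List Int)) (n : Nat) :
    ∀ (k : Nat) (down : Bool) (c0 r0 : Nat) (v : List (List Bool)) (st : List (Int × Int))
      (acc : List Int),
      (if down then (n - r0) + c0 * n else r0 + c0 * n) ≤ k →
      1 ≤ r0 → r0 < n → c0 < n → (down = false → c0 + 1 < n) →
      VRep v n (fun r c => if down then Pdown c0 r0 r c else Pup c0 r0 r c) →
      ∃ v', VRep v' n (fun _ _ => true) ∧
        loopA m (n : Int) (n : Int) (((r0 : Int), (c0 : Int)) :: st) v acc =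
          loopA m (n : Int) (n : Int) st v'
            (acc ++ (if down then segD m n c0 r0 else segU m c0 r0) ++ snakeCols m n c0 (!down)) := by
  intro k
  induction k using Nat.strong_induction_on with
  | _ k IH =>
  intro down c0 r0 v st acc hk h1 hrn hcn hup hV
  cases down with
  | true =>
    have hVd : VRep v n (Pdown c0 r0) := hV
    have hk' : (n - r0) + c0 * n ≤ k := hk
    rw [step_mark hVd (r0 : Int) (c0 : Int) (by omega) (by omega) (by omega) (by omega)
      (by simp only [Int.toNat_natCast]
          simp [Pdown, Bool.or_eq_true, Bool.and_eq_true, beq_iff_eq, decide_eq_true_iff]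
          try omega) st acc]
    simp only [Int.toNat_natCast]
    have hP1 : VRep (vset v r0 c0) n (Pdown c0 (r0 + 1)) := by
      refine VRep_ext (VRep_set hVd r0 c0 hrn hcn) ?_
      intro r c hr hc
      rw [Bool.eq_iff_iff]
      simp [Pdown, Bool.or_eq_true, Bool.and_eq_true, beq_iff_eq, decide_eq_true_iff]
      omega
    -- (r0-1, c0): predecessor (or row 0), visited
    rw [step_skip hP1 ((r0 : Int) - 1) (c0 : Int)
      (by intro _ _ _ _
          simp [Pdown, Bool.or_eq_true, Bool.and_eq_true, beq_iff_eq, decide_eq_true_iff]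
          try omega) _ _]
    -- (r0, c0+1): previous column, or out of bounds
    rw [step_skip hP1 (r0 : Int) ((c0 : Int) + 1)
      (by intro _ _ _ _
          simp [Pdown, Bool.or_eq_true, Bool.and_eq_true, beq_iff_eq, decide_eq_true_iff]
          try omega) _ _]
    by_cases hr3 : r0 + 1 < n
    · -- (r0+1, c0) unvisited: continue downward
      rw [show (r0 : Int) + 1 = ((r0 + 1 : Nat) : Int) from by push_cast; ring]
      obtain ⟨v', hfull, heq⟩ := IH ((n - (r0 + 1)) + c0 * n) (by omega) true c0 (r0 + 1)
        (vset v r0 c0) _ _ (le_refl _) (by omega) hr3 hcn (fun h => nomatch h) hP1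
      rw [heq]
      -- (r0, c0-1): junk under the full state
      rw [step_skip hfull ((r0 : Int)) ((c0 : Int) - 1) (fun _ _ _ _ => rfl) _ _]
      refine ⟨v', hfull, ?_⟩
      rw [segD_cons m n c0 r0 hrn]
      simp [List.append_assoc]
    · -- bottom of the column: r0 = n - 1
      have hr0 : r0 = n - 1 := by omega
      -- (r0+1, c0) is out of bounds
      rw [loopA_skip _ _ _ _ _ _ _ _ (by omega)]
      by_cases hc0 : 1 ≤ c0
      · -- (r0, c0-1) unvisited: turn into the next column, upward
        have hmul : (c0 - 1) * n + n = c0 * n := by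
          calc (c0 - 1) * n + n = ((c0 - 1) + 1) * n := by ring
            _ = c0 * n := by rw [show c0 - 1 + 1 = c0 from by omega]
        rw [show (r0 : Int) = ((n - 1 : Nat) : Int) from by omega,
            show (c0 : Int) - 1 = ((c0 - 1 : Nat) : Int) from by omega]
        have hP1' : VRep (vset v r0 c0) n (Pup (c0 - 1) (n - 1)) := by
          refine VRep_ext hP1 ?_
          intro r c hr hc
          rw [Bool.eq_iff_iff]
          simp [Pdown, Pup, Bool.or_eq_true, Bool.and_eq_true, beq_iff_eq, decide_eq_true_iff]
          omega
        obtain ⟨v', hfull, heq⟩ := IH ((n - 1) + (c0 - 1) * n) (by omega) false (c0 - 1) (n - 1)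
          (vset v r0 c0) _ _ (le_refl _) (by omega) (by omega) (by omega) (fun _ => by omega) hP1'
        rw [heq]
        refine ⟨v', hfull, ?_⟩
        rw [show c0 = (c0 - 1) + 1 from by omega]
        simp only [snakeCols, Bool.not_true, Bool.not_false]
        rw [show segD m n ((c0 - 1) + 1) r0 = [aget m r0 ((c0 - 1) + 1)] from by
          simp [segD, hr0, show n - (n - 1) = 1 from by omega, List.range'_one]]
        rw [hr0]
        simp [List.append_assoc]
      · -- c0 = 0: everything is visited, (r0, -1) is out of bounds
        have hc00 : c0 = 0 := by omega
        subst hc00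
        rw [loopA_skip _ _ _ _ _ _ _ _ (by omega)]
        refine ⟨vset v r0 0, ?_, ?_⟩
        · refine VRep_ext hP1 ?_
          intro r c hr hc
          simp [Pdown, Bool.or_eq_true, Bool.and_eq_true, beq_iff_eq, decide_eq_true_iff]
          omega
        · rw [show segD m n 0 r0 = [aget m r0 0] from by
            simp [segD, hr0, show n - (n - 1) = 1 from by omega, List.range'_one]]
          simp [snakeCols]
  | false =>
    have hVu : VRep v n (Pup c0 r0) := hV
    have hk' : r0 + c0 * n ≤ k := hk
    have hc1 : c0 + 1 < n := hup rfl
    rw [step_mark hVu (r0 : Int) (c0 : Int) (by omega) (by omega) (by omega) (by omega)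
      (by simp only [Int.toNat_natCast]
          simp [Pup, Bool.or_eq_true, Bool.and_eq_true, beq_iff_eq, decide_eq_true_iff]
          try omega) st acc]
    simp only [Int.toNat_natCast]
    have hP1 : VRep (vset v r0 c0) n (Pup c0 (r0 - 1)) := by
      refine VRep_ext (VRep_set hVu r0 c0 hrn hcn) ?_
      intro r c hr hc
      rw [Bool.eq_iff_iff]
      simp [Pup, Bool.or_eq_true, Bool.and_eq_true, beq_iff_eq, decide_eq_true_iff]
      omega
    by_cases hr2 : 2 ≤ r0
    · -- (r0-1, c0) unvisited: continue upward
      rw [show (r0 : Int) - 1 = ((r0 - 1 : Nat) : Int) from by omega]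
      obtain ⟨v', hfull, heq⟩ := IH ((r0 - 1) + c0 * n) (by omega) false c0 (r0 - 1)
        (vset v r0 c0) _ _ (le_refl _) (by omega) (by omega) hcn (fun _ => hc1) hP1
      rw [heq]
      rw [step_skip hfull (r0 : Int) ((c0 : Int) + 1) (fun _ _ _ _ => rfl) _ _]
      rw [step_skip hfull ((r0 : Int) + 1) (c0 : Int) (fun _ _ _ _ => rfl) _ _]
      rw [step_skip hfull (r0 : Int) ((c0 : Int) - 1) (fun _ _ _ _ => rfl) _ _]
      refine ⟨v', hfull, ?_⟩
      rw [segU_cons m c0 r0 h1]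
      simp [List.append_assoc]
    · -- top of the column: r0 = 1
      have hr0 : r0 = 1 := by omega
      subst hr0
      -- (0, c0): row 0, visited
      rw [step_skip hP1 (((1 : Nat) : Int) - 1) (c0 : Int)
        (by intro _ _ _ _
            simp [Pup, Bool.or_eq_true, Bool.and_eq_true, beq_iff_eq, decide_eq_true_iff]
            try omega) _ _]
      -- (1, c0+1): previous column, visited
      rw [step_skip hP1 ((1 : Nat) : Int) ((c0 : Int) + 1)
        (by intro _ _ _ _
            simp [Pup, Bool.or_eq_true, Bool.and_eq_true, beq_iff_eq, decide_eq_true_iff]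
            try omega) _ _]
      -- (2, c0): below, visited (or out of bounds when n = 2)
      rw [step_skip hP1 (((1 : Nat) : Int) + 1) (c0 : Int)
        (by intro _ _ _ _
            simp [Pup, Bool.or_eq_true, Bool.and_eq_true, beq_iff_eq, decide_eq_true_iff]
            try omega) _ _]
      by_cases hc0 : 1 ≤ c0
      · -- (1, c0-1) unvisited: turn into the next column, downward
        have hmul : (c0 - 1) * n + n = c0 * n := by
          calc (c0 - 1) * n + n = ((c0 - 1) + 1) * n := by ring
            _ = c0 * n := by rw [show c0 - 1 + 1 = c0 from by omega]
        rw [show ((c0 : Nat) : Int) - 1 = ((c0 - 1 : Nat) : Int) from by omega]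
        have hP1' : VRep (vset v 1 c0) n (Pdown (c0 - 1) 1) := by
          refine VRep_ext hP1 ?_
          intro r c hr hc
          rw [Bool.eq_iff_iff]
          simp [Pdown, Pup, Bool.or_eq_true, Bool.and_eq_true, beq_iff_eq, decide_eq_true_iff]
          omega
        obtain ⟨v', hfull, heq⟩ := IH ((n - 1) + (c0 - 1) * n) (by omega) true (c0 - 1) 1
          (vset v 1 c0) _ _ (le_refl _) (le_refl 1) (by omega) (by omega) (fun h => nomatch h) hP1'
        rw [heq]
        refine ⟨v', hfull, ?_⟩
        rw [show segU m c0 1 = [aget m 1 c0] from by simp [segU, List.range'_one]]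
        rw [show c0 = (c0 - 1) + 1 from by omega]
        simp only [snakeCols, Bool.not_true, Bool.not_false]
        simp [List.append_assoc]
      · -- c0 = 0: everything is visited, (1, -1) is out of bounds
        have hc00 : c0 = 0 := by omega
        subst hc00
        rw [loopA_skip _ _ _ _ _ _ _ _ (by omega)]
        refine ⟨vset v 1 0, ?_, ?_⟩
        · refine VRep_ext hP1 ?_
          intro r c hr hc
          simp [Pup, Bool.or_eq_true, Bool.and_eq_true, beq_iff_eq, decide_eq_true_iff]
          omega
        · rw [show segU m 0 1 = [aget m 1 0] from by simp [segU, List.range'_one]]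
          simp [snakeCols]

-- the row phase: processing (0, j) completes the whole traversal
theorem rowPhase (m : List (List Int)) (n : Nat) (hn : 0 < n) :
    ∀ (j : Nat), j < n → ∀ (v : List (List Bool)) (st : List (Int × Int)) (acc : List Int),
      VRep v n (Prow j) →
      ∃ v', VRep v' n (fun _ _ => true) ∧
        loopA m (n : Int) (n : Int) (((0 : Int), (j : Int)) :: st) v acc =
          loopA m (n : Int) (n : Int) st v'
            (acc ++ (List.range' j (n - j)).map (fun c => aget m 0 c) ++ snakeCols m n n true) := by
  suffices aux : ∀ (k j : Nat), n - j ≤ k → j < n →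
      ∀ (v : List (List Bool)) (st : List (Int × Int)) (acc : List Int),
      VRep v n (Prow j) →
      ∃ v', VRep v' n (fun _ _ => true) ∧
        loopA m (n : Int) (n : Int) (((0 : Int), (j : Int)) :: st) v acc =
          loopA m (n : Int) (n : Int) st v'
            (acc ++ (List.range' j (n - j)).map (fun c => aget m 0 c) ++ snakeCols m n n true) by
    exact fun j hj => aux (n - j) j (le_refl _) hj
  intro k
  induction k with
  | zero => intro j h hj; omega
  | succ k ih =>
    intro j hkj hj v st acc hV
    rw [step_mark hV (0 : Int) (j : Int) (by omega) (by omega) (by omega) (by omega)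
      (by simp only [Int.toNat_natCast, Int.toNat_zero]
          simp [Prow, Bool.and_eq_true, beq_iff_eq, decide_eq_true_iff]
          try omega) st acc]
    simp only [Int.toNat_natCast, Int.toNat_zero]
    have hP1 : VRep (vset v 0 j) n (Prow (j + 1)) := by
      refine VRep_ext (VRep_set hV 0 j hn hj) ?_
      intro r c hr hc
      rw [Bool.eq_iff_iff]
      simp [Prow, Bool.and_eq_true, beq_iff_eq, decide_eq_true_iff]
      try omega
    -- (-1, j): out of bounds
    rw [loopA_skip _ _ _ _ _ _ _ _ (by omega)]
    by_cases hj1 : j + 1 < n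
    · -- (0, j+1) unvisited: continue along row 0
      rw [show (j : Int) + 1 = ((j + 1 : Nat) : Int) from by push_cast; ring]
      obtain ⟨v', hfull, heq⟩ := ih (j + 1) (by omega) hj1 (vset v 0 j) _ _ hP1
      rw [heq]
      rw [step_skip hfull ((0 : Int) + 1) (j : Int) (fun _ _ _ _ => rfl) _ _]
      rw [step_skip hfull (0 : Int) ((j : Int) - 1) (fun _ _ _ _ => rfl) _ _]
      refine ⟨v', hfull, ?_⟩
      rw [show List.range' j (n - j) = j :: List.range' (j + 1) (n - (j + 1)) from by
        rw [show n - j = (n - (j + 1)) + 1 from by omega, List.range'_succ]]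
      simp [List.append_assoc]
    · -- j = n - 1: end of row 0
      have hj0 : j = n - 1 := by omega
      -- (0, j+1): out of bounds
      rw [loopA_skip _ _ _ _ _ _ _ _ (by omega)]
      by_cases hn1 : 1 < n
      · -- (1, n-1) unvisited: enter the column cascade
        rw [show (0 : Int) + 1 = ((1 : Nat) : Int) from by simp,
            show (j : Int) = ((n - 1 : Nat) : Int) from by omega]
        have hVd : VRep (vset v 0 j) n (Pdown (n - 1) 1) := by
          refine VRep_ext hP1 ?_
          intro r c hr hc
          rw [Bool.eq_iff_iff]
          simp [Prow, Pdown, Bool.or_eq_true, Bool.and_eq_true, beq_iff_eq, decide_eq_true_iff]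
          omega
        obtain ⟨v', hfull, heq⟩ := phase m n ((n - 1) + (n - 1) * n) true (n - 1) 1
          (vset v 0 j) _ _ (le_refl _) (le_refl 1) hn1 (by omega) (fun h => nomatch h) hVd
        rw [heq]
        rw [step_skip hfull (0 : Int) (((n - 1 : Nat) : Int) - 1) (fun _ _ _ _ => rfl) _ _]
        refine ⟨v', hfull, ?_⟩
        rw [show List.range' j (n - j) = [j] from by
          rw [show n - j = 1 from by omega, List.range'_one]]
        rw [show n = (n - 1) + 1 from by omega]
        simp only [snakeCols, Bool.not_true]
        rw [hj0]
        simp [List.append_assoc, show n - 1 + 1 - 1 = n - 1 from by omega]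
      · -- n = 1: every neighbour of (0,0) is out of bounds
        have hn0 : n = 1 := by omega
        have hj00 : j = 0 := by omega
        subst hj00
        rw [loopA_skip _ _ _ _ _ _ _ _ (by omega)]
        rw [loopA_skip _ _ _ _ _ _ _ _ (by omega)]
        refine ⟨vset v 0 0, ?_, ?_⟩
        · refine VRep_ext hP1 ?_
          intro r c hr hc
          simp [Prow, Bool.and_eq_true, beq_iff_eq, decide_eq_true_iff]
          omega
        · rw [show List.range' 0 (n - 0) = [0] from by
            rw [show n - 0 = 1 from by omega, List.range'_one]]
          rw [hn0]
          simp [snakeCols, segD]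

-- ---- B-side: the visited set agrees with the predicate P on the n × n square ----
def SRep (S : List (Int × Int)) (n : Nat) (P : Nat → Nat → Bool) : Prop :=
  ∀ r c : Nat, r < n → c < n → decide (((r : Int), (c : Int)) ∈ S) = P r c

theorem SRep_ext {S n P Q} (h : SRep S n P)
    (hpq : ∀ r c, r < n → c < n → P r c = Q r c) : SRep S n Q := by
  intro r c hr hc; rw [← hpq r c hr hc]; exact h r c hr hc

theorem SRep_add {S : List (Int × Int)} {n : Nat} {P : Nat → Nat → Bool} (h : SRep S n P)
    (r c : Nat) :
    SRep (PySem.Set.add S ((r : Int), (c : Int))) n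
      (fun r' c' => (r' == r && c' == c) || P r' c') := by
  intro r' c' hr' hc'
  have h' := h r' c' hr' hc'
  rw [Bool.eq_iff_iff]
  simp only [decide_eq_true_eq, PySem.Set.mem_add, Bool.or_eq_true, Bool.and_eq_true,
    beq_iff_eq, ← h', decide_eq_true_eq, Prod.mk.injEq, Nat.cast_inj]
  tauto

-- one-step unfolding lemmas for loopB
theorem loopB_nil (m : List (List Int)) (rows cols : Int) (S : PySem.Set (Int × Int))
    (out : List Int) : loopB m rows cols [] S out = (S, out) := by rw [loopB]

theorem loopB_pop (m : List (List Int)) (rows cols : Int) (r c : Int) (d : Nat)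
    (rest : List (Int × Int × Nat)) (S : PySem.Set (Int × Int)) (out : List Int) (hd : 4 ≤ d) :
    loopB m rows cols ((r, c, d) :: rest) S out = loopB m rows cols rest S out := by
  rw [loopB]; rw [if_pos hd]

theorem loopB_go (m : List (List Int)) (rows cols : Int) (S : PySem.Set (Int × Int))
    (out : List Int) (r c x y : Int) (d : Nat) (rest : List (Int × Int × Nat)) (hd : d < 4)
    (hx : r + (dirB d).1 = x) (hy : c + (dirB d).2 = y) :
    loopB m rows cols ((r, c, d) :: rest) S out =
      (let st := visitB m rows cols x y S out ((r, c, d + 1) :: rest);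
       loopB m rows cols st.2.2 st.1 st.2.1) := by
  rw [loopB]; rw [if_neg (by omega), hx, hy]

-- one frame step whose target is visited or out of bounds: only the counter advances
theorem stepB_skip {m : List (List Int)} {n : Nat} {S : PySem.Set (Int × Int)}
    {P : Nat → Nat → Bool} (hS : SRep S n P) (r c x y : Int) (d : Nat) (hd : d < 4)
    (hx : r + (dirB d).1 = x) (hy : c + (dirB d).2 = y)
    (hP : 0 ≤ x → 0 ≤ y → x < (n : Int) → y < (n : Int) → P x.toNat y.toNat = true)
    (rest : List (Int × Int × Nat)) (out : List Int) :
    loopB m (n : Int) (n : Int) ((r, c, d) :: rest) S out =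
      loopB m (n : Int) (n : Int) ((r, c, d + 1) :: rest) S out := by
  rw [loopB_go m (n : Int) (n : Int) S out r c x y d rest hd hx hy]
  by_cases hin : 0 ≤ x ∧ x < (n : Int) ∧ 0 ≤ y ∧ y < (n : Int)
  · have hmem : (x, y) ∈ S := by
      have hrep := hS x.toNat y.toNat (by omega) (by omega)
      rw [hP hin.1 hin.2.2.1 hin.2.1 hin.2.2.2] at hrep
      rw [Int.toNat_of_nonneg hin.1, Int.toNat_of_nonneg hin.2.2.1] at hrep
      exact of_decide_eq_true hrep
    simp [visitB, hmem]
  · simp only [visitB]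
    rw [if_neg (by tauto)]

-- one frame step whose target is a fresh in-range cell: mark, record, push its frame
theorem stepB_mark {m : List (List Int)} {n : Nat} {S : PySem.Set (Int × Int)}
    {P : Nat → Nat → Bool} (hS : SRep S n P) (r c x y : Int) (d : Nat) (hd : d < 4)
    (hx : r + (dirB d).1 = x) (hy : c + (dirB d).2 = y)
    (h0x : 0 ≤ x) (h0y : 0 ≤ y) (hxn : x < (n : Int)) (hyn : y < (n : Int))
    (hP : P x.toNat y.toNat = false)
    (rest : List (Int × Int × Nat)) (out : List Int) :
    loopB m (n : Int) (n : Int) ((r, c, d) :: rest) S out =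
      loopB m (n : Int) (n : Int) ((x, y, 0) :: (r, c, d + 1) :: rest)
        (PySem.Set.add S (x, y)) (out ++ [aget m x.toNat y.toNat]) := by
  rw [loopB_go m (n : Int) (n : Int) S out r c x y d rest hd hx hy]
  have hmem : ¬((x, y) ∈ S) := by
    have hrep := hS x.toNat y.toNat (by omega) (by omega)
    rw [hP] at hrep
    rw [Int.toNat_of_nonneg h0x, Int.toNat_of_nonneg h0y] at hrep
    exact of_decide_eq_false hrep
  simp only [visitB]
  rw [if_pos ⟨h0x, hxn, h0y, hyn, hmem⟩]

-- B's column phases: after cell (r0, c0) has just been visited and its frame pushed,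
-- running the loop to the point where that frame is popped completes the traversal
theorem phaseB (m : List (List Int)) (n : Nat) :
    ∀ (k : Nat) (down : Bool) (c0 r0 : Nat) (S : PySem.Set (Int × Int))
      (rest : List (Int × Int × Nat)) (acc : List Int),
      (if down then (n - r0) + c0 * n else r0 + c0 * n) ≤ k →
      1 ≤ r0 → r0 < n → c0 < n → (down = false → c0 + 1 < n) →
      SRep S n (fun r c => if down then Pdown c0 (r0 + 1) r c else Pup c0 (r0 - 1) r c) →
      ∃ S', SRep S' n (fun _ _ => true) ∧
        loopB m (n : Int) (n : Int) (((r0 : Int), (c0 : Int), 0) :: rest) S acc =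
          loopB m (n : Int) (n : Int) rest S'
            (acc ++ (if down then segD m n c0 (r0 + 1) else segU m c0 (r0 - 1))
              ++ snakeCols m n c0 (!down)) := by
  intro k
  induction k using Nat.strong_induction_on with
  | _ k IH =>
  intro down c0 r0 S rest acc hk h1 hrn hcn hup hS
  cases down with
  | true =>
    have hSd : SRep S n (Pdown c0 (r0 + 1)) := hS
    have hk' : (n - r0) + c0 * n ≤ k := hk
    -- d = 0: (r0-1, c0) visited (row 0 or the predecessor)
    rw [stepB_skip hSd (r0 : Int) (c0 : Int) ((r0 : Int) - 1) (c0 : Int) 0 (by omega)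
      (by simp [dirB] <;> omega) (by simp [dirB] <;> omega)
      (by intro h0x _ _ _
          have hx' : ((r0 : Int) - 1).toNat = r0 - 1 := by omega
          simp only [hx', Int.toNat_natCast]
          simp [Pdown, Bool.or_eq_true, Bool.and_eq_true, beq_iff_eq, decide_eq_true_iff]
          try omega) _ _]
    -- d = 1: (r0, c0+1) previous column or out of bounds
    rw [stepB_skip hSd (r0 : Int) (c0 : Int) (r0 : Int) ((c0 : Int) + 1) 1 (by omega)
      (by simp [dirB] <;> omega) (by simp [dirB] <;> omega)
      (by intro _ _ _ _
          have hy' : ((c0 : Int) + 1).toNat = c0 + 1 := by omega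
          simp only [hy', Int.toNat_natCast]
          simp [Pdown, Bool.or_eq_true, Bool.and_eq_true, beq_iff_eq, decide_eq_true_iff]
          try omega) _ _]
    by_cases hr3 : r0 + 1 < n
    · -- d = 2: (r0+1, c0) fresh — continue downward
      rw [stepB_mark hSd (r0 : Int) (c0 : Int) ((r0 + 1 : Nat) : Int) (c0 : Int) 2 (by omega)
        (by simp [dirB] <;> omega) (by simp [dirB] <;> omega)
        (by omega) (by omega) (by omega) (by omega)
        (by simp only [Int.toNat_natCast]
            simp [Pdown, Bool.or_eq_true, Bool.and_eq_true, beq_iff_eq, decide_eq_true_iff]) _ _]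
      simp only [Int.toNat_natCast]
      have hP1 : SRep (PySem.Set.add S (((r0 + 1 : Nat) : Int), (c0 : Int))) n
          (Pdown c0 (r0 + 2)) := by
        refine SRep_ext (SRep_add hSd (r0 + 1) c0) ?_
        intro r c hr hc
        rw [Bool.eq_iff_iff]
        simp [Pdown, Bool.or_eq_true, Bool.and_eq_true, beq_iff_eq, decide_eq_true_iff]
        omega
      obtain ⟨S', hfull, heq⟩ := IH ((n - (r0 + 1)) + c0 * n) (by omega) true c0 (r0 + 1)
        (PySem.Set.add S (((r0 + 1 : Nat) : Int), (c0 : Int))) _ _ (le_refl _)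
        (by omega) hr3 hcn (fun h => nomatch h) hP1
      rw [heq]
      -- d = 3: (r0, c0-1) under the full state
      rw [stepB_skip hfull (r0 : Int) (c0 : Int) (r0 : Int) ((c0 : Int) - 1) 3 (by omega)
        (by simp [dirB] <;> omega) (by simp [dirB] <;> omega) (fun _ _ _ _ => rfl) _ _]
      -- d = 4: pop
      rw [loopB_pop _ _ _ _ _ _ _ _ _ (by omega)]
      refine ⟨S', hfull, ?_⟩
      rw [segD_cons m n c0 (r0 + 1) hr3]
      simp [List.append_assoc]
    · -- bottom of the column: r0 = n - 1; d = 2 is out of bounds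
      have hr0 : r0 = n - 1 := by omega
      rw [stepB_skip hSd (r0 : Int) (c0 : Int) ((r0 : Int) + 1) (c0 : Int) 2 (by omega)
        (by simp [dirB] <;> omega) (by simp [dirB] <;> omega) (by intro _ _ hxn _; omega) _ _]
      by_cases hc0 : 1 ≤ c0
      · -- d = 3: (r0, c0-1) fresh — turn into the next column, upward
        rw [stepB_mark hSd (r0 : Int) (c0 : Int) (r0 : Int) ((c0 - 1 : Nat) : Int) 3 (by omega)
          (by simp [dirB] <;> omega) (by simp [dirB] <;> omega)
          (by omega) (by omega) (by omega) (by omega)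
          (by simp only [Int.toNat_natCast]
              simp [Pdown, Bool.or_eq_true, Bool.and_eq_true, beq_iff_eq, decide_eq_true_iff]
              try omega) _ _]
        simp only [Int.toNat_natCast]
        have hmul : (c0 - 1) * n + n = c0 * n := by
          calc (c0 - 1) * n + n = ((c0 - 1) + 1) * n := by ring
            _ = c0 * n := by rw [show c0 - 1 + 1 = c0 from by omega]
        have hP1' : SRep (PySem.Set.add S ((r0 : Int), ((c0 - 1 : Nat) : Int))) n
            (Pup (c0 - 1) (r0 - 1)) := by
          refine SRep_ext (SRep_add hSd r0 (c0 - 1)) ?_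
          intro r c hr hc
          rw [Bool.eq_iff_iff]
          simp [Pdown, Pup, Bool.or_eq_true, Bool.and_eq_true, beq_iff_eq, decide_eq_true_iff]
          omega
        obtain ⟨S', hfull, heq⟩ := IH (r0 + (c0 - 1) * n) (by omega) false (c0 - 1) r0
          (PySem.Set.add S ((r0 : Int), ((c0 - 1 : Nat) : Int))) _ _ (le_refl _)
          (by omega) (by omega) (by omega) (fun _ => by omega) hP1'
        rw [heq]
        -- d = 4: pop
        rw [loopB_pop _ _ _ _ _ _ _ _ _ (by omega)]
        refine ⟨S', hfull, ?_⟩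
        rw [show segD m n c0 (r0 + 1) = [] from by
          simp [segD, hr0, show n - (n - 1 + 1) = 0 from by omega]]
        simp only [Bool.not_true]
        rw [show snakeCols m n c0 false = snakeCols m n ((c0 - 1) + 1) false from by
          rw [Nat.sub_add_cancel (by omega : 1 ≤ c0)]]
        rw [snakeCols_succ]
        rw [show segU m (c0 - 1) (n - 1) = aget m r0 (c0 - 1) :: segU m (c0 - 1) (r0 - 1) from by
          rw [segU_cons m (c0 - 1) (n - 1) (by omega), hr0]]
        simp [List.append_assoc]
      · -- c0 = 0: (r0, -1) is out of bounds; everything visited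
        have hc00 : c0 = 0 := by omega
        subst hc00
        rw [stepB_skip hSd (r0 : Int) ((0 : Nat) : Int) (r0 : Int) (((0 : Nat) : Int) - 1) 3
          (by omega) (by simp [dirB] <;> omega) (by simp [dirB] <;> omega) (by intro _ h0y _ _; omega) _ _]
        rw [loopB_pop _ _ _ _ _ _ _ _ _ (by omega)]
        refine ⟨S, ?_, ?_⟩
        · refine SRep_ext hSd ?_
          intro r c hr hc
          simp [Pdown, Bool.or_eq_true, Bool.and_eq_true, beq_iff_eq, decide_eq_true_iff]
          omega
        · rw [show segD m n 0 (r0 + 1) = [] from by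
            simp [segD, hr0, show n - (n - 1 + 1) = 0 from by omega]]
          simp [snakeCols]
  | false =>
    have hSu : SRep S n (Pup c0 (r0 - 1)) := hS
    have hk' : r0 + c0 * n ≤ k := hk
    have hc1 : c0 + 1 < n := hup rfl
    by_cases hr2 : 2 ≤ r0
    · -- d = 0: (r0-1, c0) fresh — continue upward
      rw [stepB_mark hSu (r0 : Int) (c0 : Int) ((r0 - 1 : Nat) : Int) (c0 : Int) 0 (by omega)
        (by simp [dirB] <;> omega) (by simp [dirB] <;> omega)
        (by omega) (by omega) (by omega) (by omega)
        (by simp only [Int.toNat_natCast]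
            simp [Pup, Bool.or_eq_true, Bool.and_eq_true, beq_iff_eq, decide_eq_true_iff]
            try omega) _ _]
      simp only [Int.toNat_natCast]
      have hP1 : SRep (PySem.Set.add S (((r0 - 1 : Nat) : Int), (c0 : Int))) n
          (Pup c0 ((r0 - 1) - 1)) := by
        refine SRep_ext (SRep_add hSu (r0 - 1) c0) ?_
        intro r c hr hc
        rw [Bool.eq_iff_iff]
        simp [Pup, Bool.or_eq_true, Bool.and_eq_true, beq_iff_eq, decide_eq_true_iff]
        omega
      obtain ⟨S', hfull, heq⟩ := IH ((r0 - 1) + c0 * n) (by omega) false c0 (r0 - 1)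
        (PySem.Set.add S (((r0 - 1 : Nat) : Int), (c0 : Int))) _ _ (le_refl _)
        (by omega) (by omega) hcn (fun _ => hc1) hP1
      rw [heq]
      rw [stepB_skip hfull (r0 : Int) (c0 : Int) (r0 : Int) ((c0 : Int) + 1) 1 (by omega)
        (by simp [dirB] <;> omega) (by simp [dirB] <;> omega) (fun _ _ _ _ => rfl) _ _]
      rw [stepB_skip hfull (r0 : Int) (c0 : Int) ((r0 : Int) + 1) (c0 : Int) 2 (by omega)
        (by simp [dirB] <;> omega) (by simp [dirB] <;> omega) (fun _ _ _ _ => rfl) _ _]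
      rw [stepB_skip hfull (r0 : Int) (c0 : Int) (r0 : Int) ((c0 : Int) - 1) 3 (by omega)
        (by simp [dirB] <;> omega) (by simp [dirB] <;> omega) (fun _ _ _ _ => rfl) _ _]
      rw [loopB_pop _ _ _ _ _ _ _ _ _ (by omega)]
      refine ⟨S', hfull, ?_⟩
      rw [segU_cons m c0 (r0 - 1) (by omega)]
      simp [List.append_assoc, show r0 - 1 - 1 = r0 - 2 from rfl]
    · -- top of the column: r0 = 1
      have hr0 : r0 = 1 := by omega
      subst hr0
      -- d = 0: (0, c0) is row 0, visited
      rw [stepB_skip hSu ((1 : Nat) : Int) (c0 : Int) (((1 : Nat) : Int) - 1) (c0 : Int) 0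
        (by omega) (by simp [dirB] <;> omega) (by simp [dirB] <;> omega)
        (by intro _ _ _ _
            have hx' : (((1 : Nat) : Int) - 1).toNat = 0 := by omega
            simp only [hx', Int.toNat_natCast]
            simp [Pup, Bool.or_eq_true, Bool.and_eq_true, beq_iff_eq, decide_eq_true_iff]) _ _]
      -- d = 1: (1, c0+1) previous column, visited
      rw [stepB_skip hSu ((1 : Nat) : Int) (c0 : Int) ((1 : Nat) : Int) ((c0 : Int) + 1) 1
        (by omega) (by simp [dirB] <;> omega) (by simp [dirB] <;> omega)
        (by intro _ _ _ _
            have hy' : ((c0 : Int) + 1).toNat = c0 + 1 := by omega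
            simp only [hy', Int.toNat_natCast]
            simp [Pup, Bool.or_eq_true, Bool.and_eq_true, beq_iff_eq, decide_eq_true_iff]
            try omega) _ _]
      -- d = 2: (2, c0) below, visited (or out of bounds when n = 2)
      rw [stepB_skip hSu ((1 : Nat) : Int) (c0 : Int) (((1 : Nat) : Int) + 1) (c0 : Int) 2
        (by omega) (by simp [dirB] <;> omega) (by simp [dirB] <;> omega)
        (by intro _ _ _ _
            have hx' : (((1 : Nat) : Int) + 1).toNat = 2 := by omega
            simp only [hx', Int.toNat_natCast]
            simp [Pup, Bool.or_eq_true, Bool.and_eq_true, beq_iff_eq, decide_eq_true_iff]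
            try omega) _ _]
      by_cases hc0 : 1 ≤ c0
      · -- d = 3: (1, c0-1) fresh — turn into the next column, downward
        rw [stepB_mark hSu ((1 : Nat) : Int) (c0 : Int) ((1 : Nat) : Int) ((c0 - 1 : Nat) : Int) 3
          (by omega) (by simp [dirB] <;> omega) (by simp [dirB] <;> omega)
          (by omega) (by omega) (by omega) (by omega)
          (by simp only [Int.toNat_natCast]
              simp [Pup, Bool.or_eq_true, Bool.and_eq_true, beq_iff_eq, decide_eq_true_iff]
              try omega) _ _]
        simp only [Int.toNat_natCast]
        have hmul : (c0 - 1) * n + n = c0 * n := by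
          calc (c0 - 1) * n + n = ((c0 - 1) + 1) * n := by ring
            _ = c0 * n := by rw [show c0 - 1 + 1 = c0 from by omega]
        have hP1' : SRep (PySem.Set.add S (((1 : Nat) : Int), ((c0 - 1 : Nat) : Int))) n
            (Pdown (c0 - 1) (1 + 1)) := by
          refine SRep_ext (SRep_add hSu 1 (c0 - 1)) ?_
          intro r c hr hc
          rw [Bool.eq_iff_iff]
          simp [Pdown, Pup, Bool.or_eq_true, Bool.and_eq_true, beq_iff_eq, decide_eq_true_iff]
          omega
        obtain ⟨S', hfull, heq⟩ := IH ((n - 1) + (c0 - 1) * n) (by omega) true (c0 - 1) 1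
          (PySem.Set.add S (((1 : Nat) : Int), ((c0 - 1 : Nat) : Int))) _ _ (le_refl _)
          (le_refl 1) (by omega) (by omega) (fun h => nomatch h) hP1'
        rw [heq]
        rw [loopB_pop _ _ _ _ _ _ _ _ _ (by omega)]
        refine ⟨S', hfull, ?_⟩
        rw [show segU m c0 (1 - 1) = [] from by simp [segU]]
        simp only [Bool.not_false]
        rw [show snakeCols m n c0 true = snakeCols m n ((c0 - 1) + 1) true from by
          rw [Nat.sub_add_cancel (by omega : 1 ≤ c0)]]
        rw [snakeCols_succ]
        rw [segD_cons m n (c0 - 1) 1 (by omega)]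
        simp [List.append_assoc]
      · -- c0 = 0: (1, -1) is out of bounds; everything visited
        have hc00 : c0 = 0 := by omega
        subst hc00
        rw [stepB_skip hSu ((1 : Nat) : Int) ((0 : Nat) : Int) ((1 : Nat) : Int)
          (((0 : Nat) : Int) - 1) 3 (by omega) (by simp [dirB] <;> omega) (by simp [dirB] <;> omega)
          (by intro _ h0y _ _; omega) _ _]
        rw [loopB_pop _ _ _ _ _ _ _ _ _ (by omega)]
        refine ⟨S, ?_, ?_⟩
        · refine SRep_ext hSu ?_
          intro r c hr hc
          simp [Pup, Bool.or_eq_true, Bool.and_eq_true, beq_iff_eq, decide_eq_true_iff]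
          omega
        · rw [show segU m 0 (1 - 1) = [] from by simp [segU]]
          simp [snakeCols]

-- B's row phase: after cell (0, j) has just been visited and its frame pushed,
-- running the loop to the point where that frame is popped completes the traversal
theorem rowPhaseB (m : List (List Int)) (n : Nat) (hn : 0 < n) :
    ∀ (j : Nat), j < n → ∀ (S : PySem.Set (Int × Int)) (rest : List (Int × Int × Nat))
      (acc : List Int),
      SRep S n (Prow (j + 1)) →
      ∃ S', SRep S' n (fun _ _ => true) ∧
        loopB m (n : Int) (n : Int) (((0 : Int), (j : Int), 0) :: rest) S acc =
          loopB m (n : Int) (n : Int) rest S'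
            (acc ++ (List.range' (j + 1) (n - (j + 1))).map (fun c => aget m 0 c)
              ++ snakeCols m n n true) := by
  suffices aux : ∀ (k j : Nat), n - j ≤ k → j < n →
      ∀ (S : PySem.Set (Int × Int)) (rest : List (Int × Int × Nat)) (acc : List Int),
      SRep S n (Prow (j + 1)) →
      ∃ S', SRep S' n (fun _ _ => true) ∧
        loopB m (n : Int) (n : Int) (((0 : Int), (j : Int), 0) :: rest) S acc =
          loopB m (n : Int) (n : Int) rest S'
            (acc ++ (List.range' (j + 1) (n - (j + 1))).map (fun c => aget m 0 c)
              ++ snakeCols m n n true) by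
    exact fun j hj => aux (n - j) j (le_refl _) hj
  intro k
  induction k with
  | zero => intro j h hj; omega
  | succ k ih =>
    intro j hkj hj S rest acc hS
    -- d = 0: (-1, j) out of bounds
    rw [stepB_skip hS (0 : Int) (j : Int) ((0 : Int) - 1) (j : Int) 0 (by omega)
      (by simp [dirB] <;> omega) (by simp [dirB] <;> omega) (by intro h0x _ _ _; omega) _ _]
    by_cases hj1 : j + 1 < n
    · -- d = 1: (0, j+1) fresh — continue along row 0
      rw [stepB_mark hS (0 : Int) (j : Int) (0 : Int) ((j + 1 : Nat) : Int) 1 (by omega)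
        (by simp [dirB] <;> omega) (by simp [dirB] <;> omega)
        (by omega) (by omega) (by omega) (by omega)
        (by simp only [Int.toNat_natCast, Int.toNat_zero]
            simp [Prow, Bool.and_eq_true, beq_iff_eq, decide_eq_true_iff]) _ _]
      simp only [Int.toNat_natCast, Int.toNat_zero]
      have hP1 : SRep (PySem.Set.add S ((0 : Int), ((j + 1 : Nat) : Int))) n
          (Prow (j + 2)) := by
        refine SRep_ext (by
          have := SRep_add hS 0 (j + 1)
          simpa using this) ?_
        intro r c hr hc
        rw [Bool.eq_iff_iff]
        simp [Prow, Bool.and_eq_true, beq_iff_eq, decide_eq_true_iff]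
        omega
      obtain ⟨S', hfull, heq⟩ := ih (j + 1) (by omega) hj1
        (PySem.Set.add S ((0 : Int), ((j + 1 : Nat) : Int))) _ _ hP1
      rw [heq]
      rw [stepB_skip hfull (0 : Int) (j : Int) ((0 : Int) + 1) (j : Int) 2 (by omega)
        (by simp [dirB] <;> omega) (by simp [dirB] <;> omega) (fun _ _ _ _ => rfl) _ _]
      rw [stepB_skip hfull (0 : Int) (j : Int) (0 : Int) ((j : Int) - 1) 3 (by omega)
        (by simp [dirB] <;> omega) (by simp [dirB] <;> omega) (fun _ _ _ _ => rfl) _ _]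
      rw [loopB_pop _ _ _ _ _ _ _ _ _ (by omega)]
      refine ⟨S', hfull, ?_⟩
      rw [show List.range' (j + 1) (n - (j + 1))
          = (j + 1) :: List.range' (j + 2) (n - (j + 2)) from by
        rw [show n - (j + 1) = (n - (j + 2)) + 1 from by omega, List.range'_succ]]
      simp [List.append_assoc]
    · -- j = n - 1: d = 1 is out of bounds
      have hj0 : j = n - 1 := by omega
      rw [stepB_skip hS (0 : Int) (j : Int) (0 : Int) ((j : Int) + 1) 1 (by omega)
        (by simp [dirB] <;> omega) (by simp [dirB] <;> omega) (by intro _ _ _ hyn; omega) _ _]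
      by_cases hn1 : 1 < n
      · -- d = 2: (1, n-1) fresh — enter the column cascade
        rw [stepB_mark hS (0 : Int) (j : Int) ((1 : Nat) : Int) ((n - 1 : Nat) : Int) 2
          (by omega) (by simp [dirB] <;> omega) (by simp [dirB] <;> omega)
          (by omega) (by omega) (by omega) (by omega)
          (by simp only [Int.toNat_natCast]
              simp [Prow, Bool.and_eq_true, beq_iff_eq, decide_eq_true_iff]) _ _]
        simp only [Int.toNat_natCast]
        have hSd : SRep (PySem.Set.add S (((1 : Nat) : Int), ((n - 1 : Nat) : Int))) n
            (Pdown (n - 1) (1 + 1)) := by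
          refine SRep_ext (SRep_add hS 1 (n - 1)) ?_
          intro r c hr hc
          rw [Bool.eq_iff_iff]
          simp [Prow, Pdown, Bool.or_eq_true, Bool.and_eq_true, beq_iff_eq, decide_eq_true_iff]
          omega
        obtain ⟨S', hfull, heq⟩ := phaseB m n ((n - 1) + (n - 1) * n) true (n - 1) 1
          (PySem.Set.add S (((1 : Nat) : Int), ((n - 1 : Nat) : Int))) _ _ (le_refl _)
          (le_refl 1) hn1 (by omega) (fun h => nomatch h) hSd
        rw [heq]
        rw [stepB_skip hfull (0 : Int) (j : Int) (0 : Int) ((j : Int) - 1) 3 (by omega)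
          (by simp [dirB] <;> omega) (by simp [dirB] <;> omega) (fun _ _ _ _ => rfl) _ _]
        rw [loopB_pop _ _ _ _ _ _ _ _ _ (by omega)]
        refine ⟨S', hfull, ?_⟩
        rw [show List.range' (j + 1) (n - (j + 1)) = [] from by
          rw [show n - (j + 1) = 0 from by omega]; rfl]
        rw [show snakeCols m n n true = snakeCols m n ((n - 1) + 1) true from by
          rw [Nat.sub_add_cancel (by omega : 1 ≤ n)]]
        rw [snakeCols_succ]
        rw [segD_cons m n (n - 1) 1 (by omega)]
        simp [List.append_assoc]
      · -- n = 1: every neighbour of (0,0) is out of bounds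
        have hn0 : n = 1 := by omega
        have hj00 : j = 0 := by omega
        subst hj00
        rw [stepB_skip hS (0 : Int) ((0 : Nat) : Int) ((0 : Int) + 1) ((0 : Nat) : Int) 2
          (by omega) (by simp [dirB] <;> omega) (by simp [dirB] <;> omega) (by intro _ _ hxn _; omega) _ _]
        rw [stepB_skip hS (0 : Int) ((0 : Nat) : Int) (0 : Int) (((0 : Nat) : Int) - 1) 3
          (by omega) (by simp [dirB] <;> omega) (by simp [dirB] <;> omega) (by intro _ h0y _ _; omega) _ _]
        rw [loopB_pop _ _ _ _ _ _ _ _ _ (by omega)]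
        refine ⟨S, ?_, ?_⟩
        · refine SRep_ext hS ?_
          intro r c hr hc
          simp [Prow, Bool.and_eq_true, beq_iff_eq, decide_eq_true_iff]
          omega
        · rw [show List.range' (0 + 1) (n - (0 + 1)) = [] from by
            rw [show n - (0 + 1) = 0 from by omega]; rfl]
          rw [hn0]
          simp [snakeCols, segD]

theorem dfs_on_matrix_spec : Claim_equal_dfs_on_matrix := by
  unfold Claim_equal_dfs_on_matrix
  intro matrix hdom hpre
  unfold Spec_dfs_on_matrix
  obtain ⟨hne, hshape⟩ := hpre
  cases matrix with
  | nil => exact absurd rfl hne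
  | cons row0 rest =>
  rcases hshape with hz | ⟨hsq, _⟩
  · -- first row empty: both sides reject the start cell and return []
    simp only [List.headD_cons] at hz
    show (loopA (row0 :: rest) ((row0 :: rest).length : Int) (row0.length : Int)
        [(0, 0)] (List.replicate (row0 :: rest).length (List.replicate row0.length false)) []).2
      = _
    rw [loopA_skip _ _ _ _ _ _ _ _ (by omega), loopA_nil]
    show _ = (loopB (row0 :: rest) ((row0 :: rest).length : Int) (row0.length : Int)
        (visitB (row0 :: rest) ((row0 :: rest).length : Int) (row0.length : Int) 0 0
          PySem.Set.empty [] []).2.2 _ _).2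
    rw [show (visitB (row0 :: rest) ((row0 :: rest).length : Int) (row0.length : Int) 0 0
        PySem.Set.empty [] []) = (PySem.Set.empty, [], []) from by
      unfold visitB
      rw [if_neg (by rw [hz]; simp)]]
    rw [loopB_nil]
  · simp only [List.headD_cons] at hsq
    have hn : 0 < row0.length := by
      rcases Nat.eq_zero_or_pos row0.length with h | h
      · rw [hsq] at h; simp at h
      · exact h
    -- the A side
    show (loopA (row0 :: rest) ((row0 :: rest).length : Int) (row0.length : Int)
        [(0, 0)] (List.replicate (row0 :: rest).length (List.replicate row0.length false)) []).2
      = _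
    have hV0 : VRep (List.replicate (row0 :: rest).length (List.replicate row0.length false))
        row0.length (Prow 0) := by
      refine VRep_ext (VRep_replicate _ _ (by omega)) ?_
      intro r c hr hc
      simp [Prow]
    obtain ⟨v', _, heqA⟩ := rowPhase (row0 :: rest) row0.length hn 0 hn _ [] [] hV0
    rw [show (((row0 :: rest).length : Nat) : Int) = ((row0.length : Nat) : Int) from by rw [hsq]]
    simp only [Nat.cast_zero] at heqA
    rw [heqA, loopA_nil]
    -- the B side
    show _ = (loopB (row0 :: rest) ((row0 :: rest).length : Int) (row0.length : Int)
        (visitB (row0 :: rest) ((row0 :: rest).length : Int) (row0.length : Int) 0 0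
          PySem.Set.empty [] []).2.2 _ _).2
    rw [show (visitB (row0 :: rest) ((row0 :: rest).length : Int) (row0.length : Int) 0 0
        PySem.Set.empty [] [])
        = ([((0 : Int), (0 : Int))], [aget (row0 :: rest) 0 0], [((0 : Int), (0 : Int), 0)]) from by
      unfold visitB
      rw [if_pos (by refine ⟨le_refl _, by push_cast; omega, le_refl _, by push_cast; omega, ?_⟩
                     simp [PySem.Set.empty])]
      rfl]
    have hS0 : SRep [((0 : Int), (0 : Int))] row0.length (Prow (0 + 1)) := by
      intro r c hr hc
      rw [Bool.eq_iff_iff]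
      simp [Prow, Bool.and_eq_true, beq_iff_eq, decide_eq_true_iff, Prod.ext_iff]
      try omega
    obtain ⟨S', _, heqB⟩ := rowPhaseB (row0 :: rest) row0.length hn 0 hn
      [((0 : Int), (0 : Int))] [] [aget (row0 :: rest) 0 0] hS0
    rw [show (((row0 :: rest).length : Nat) : Int) = ((row0.length : Nat) : Int) from by rw [hsq]]
    simp only [Nat.cast_zero] at heqB
    rw [heqB, loopB_nil]
    -- both are the row-0 values followed by the snake
    rw [show List.range' 0 (row0.length - 0)
        = 0 :: List.range' (0 + 1) (row0.length - (0 + 1)) from by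
      rw [show row0.length - 0 = (row0.length - (0 + 1)) + 1 from by omega, List.range'_succ]]
    simp

-- ===== VERDICT (by name: the statement is the Claim_ definition above) =====
-- (the verdict theorem dfs_on_matrix_spec is proved above; nothing follows it)
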